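-- pv_equiv track=rewrite | github.com/appleeatsapples-lang/SIRR | Engine/combination_engine.py | _semantic_proximity
-- ===== SOURCE A (Python) =====
-- def _semantic_proximity(tag_a: str, tag_b: str) -> bool:
--     """Check if two tags are semantically proximate.
--
--     Uses semantic clusters rather than string matching.
--     """
--     # Semantic clusters — bridge root tags and sign tags vocabulary
--     # Each cluster groups tags that share the same energetic direction
--     clusters = [
--         # Power/intensity cluster (Root 8 + Scorpio overlap)
--         {"power", "authority", "sovereignty", "domination", "mastery", "material_mastery",
--          "strength", "intensity", "penetration", "fortitude", "inner_power", "taming_force",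
--          "qudra", "shani", "karmic_lord", "fixity"},
--         # Concealment/mystery cluster (Root 7 + Scorpio)
--         {"concealment", "mystery", "secrecy", "hidden", "batin", "withdrawal",
--          "introspection", "sirr", "ketu", "moksha", "analysis"},
--         # Expression/creativity cluster (Root 3 + Leo/Gemini)
--         {"expression", "communication", "creativity", "eloquence", "bayan",
--          "radiance", "performance", "duality", "connection", "khalq", "creation",
--          "fertility", "abundance", "creative_matrix", "creative_synthesis"},
--         # Structure/foundation cluster (Root 4 + Capricorn/Taurus)
--         {"structure", "foundation", "discipline", "order", "stability",
--          "ambition", "endurance", "rootedness", "accumulation", "arkan", "nizam"},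
--         # Freedom/change cluster (Root 5 + Sagittarius/Aquarius)
--         {"freedom", "change", "adventure", "movement", "exploration", "liberation",
--          "expansion", "vision", "philosophy", "innovation", "rebellion", "haraka"},
--         # Transformation/crisis cluster (Scorpio specific)
--         {"transformation", "crisis", "dissolution", "surrender", "transcendence"},
--         # Nurturing/service cluster (Root 6 + Cancer/Virgo)
--         {"nurturing", "service", "harmony", "compassion", "responsibility",
--          "protection", "emotion", "sanctuary", "healing", "refinement", "ihsan", "beauty"},
--         # Independence/initiation cluster (Root 1 + Aries)
--         {"independence", "initiation", "pioneer", "self-reliance", "assertion",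
--          "impulse", "courage", "action", "tawhid", "alif"},
--         # Wisdom/spirituality cluster (Root 7/9)
--         {"spirituality", "wisdom", "inner_vision", "completion", "universality",
--          "humanitarianism", "collective", "kamal", "tamam"},
--         # Expansion/growth cluster (Root 3/5/9 + Sagittarius/Jupiter)
--         {"expansion", "growth", "abundance", "generosity", "prosperity",
--          "brihaspati", "guru", "trimurti", "wood_growth"},
--         # Restriction/contraction cluster (Root 4/8 + Saturn)
--         {"contraction", "limitation", "restriction", "endurance", "karma",
--          "discipline", "patience"},
--         # Intuition/illumination cluster (Root 11/Moon)
--         {"intuition", "illumination", "inspiration", "channel", "sensitivity",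
--          "receptivity", "memory", "ilham", "kashf"},
--         # Partnership/diplomacy cluster (Root 2 + Libra)
--         {"partnership", "diplomacy", "balance", "aesthetics", "justice",
--          "pair_harmony", "dual_nature", "mizan"},
--     ]
--
--     for cluster in clusters:
--         if tag_a in cluster and tag_b in cluster:
--             return True
--     return False
-- ===== SOURCE B (Python) =====
-- # One-time inverted index (tag -> set of cluster ids) over space-joined cluster strings; query = two lookups + set intersection.
-- _CLUSTER_WORDS = [
--     'power authority sovereignty domination mastery material_mastery strength intensity penetration fortitude inner_power taming_force qudra shani karmic_lord fixity',
--     'concealment mystery secrecy hidden batin withdrawal introspection sirr ketu moksha analysis',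
--     'expression communication creativity eloquence bayan radiance performance duality connection khalq creation fertility abundance creative_matrix creative_synthesis',
--     'structure foundation discipline order stability ambition endurance rootedness accumulation arkan nizam',
--     'freedom change adventure movement exploration liberation expansion vision philosophy innovation rebellion haraka',
--     'transformation crisis dissolution surrender transcendence',
--     'nurturing service harmony compassion responsibility protection emotion sanctuary healing refinement ihsan beauty',
--     'independence initiation pioneer self-reliance assertion impulse courage action tawhid alif',
--     'spirituality wisdom inner_vision completion universality humanitarianism collective kamal tamam',
--     'expansion growth abundance generosity prosperity brihaspati guru trimurti wood_growth',
--     'contraction limitation restriction endurance karma discipline patience',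
--     'intuition illumination inspiration channel sensitivity receptivity memory ilham kashf',
--     'partnership diplomacy balance aesthetics justice pair_harmony dual_nature mizan',
-- ]
--
-- _INDEX = {}
-- for _i, _words in enumerate(_CLUSTER_WORDS):
--     for _t in _words.split():
--         _INDEX.setdefault(_t, set()).add(_i)
-- _EMPTY = frozenset()
--
--
-- def _semantic_proximity(tag_a: str, tag_b: str) -> bool:
--     """Check if two tags are semantically proximate (shared semantic cluster)."""
--     return bool(_INDEX.get(tag_a, _EMPTY) & _INDEX.get(tag_b, _EMPTY))
-- ===== Notes on version B (the rewrite author's own statement) =====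
-- stated objective: idiomatic
-- what changed: Replaces the per-call linear scan over thirteen cluster set literals with a one-time inverted index (dict mapping each tag to the set of cluster ids, built by splitting space-joined cluster strings); the query becomes two dict lookups and a set intersection.
import Mathlib
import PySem

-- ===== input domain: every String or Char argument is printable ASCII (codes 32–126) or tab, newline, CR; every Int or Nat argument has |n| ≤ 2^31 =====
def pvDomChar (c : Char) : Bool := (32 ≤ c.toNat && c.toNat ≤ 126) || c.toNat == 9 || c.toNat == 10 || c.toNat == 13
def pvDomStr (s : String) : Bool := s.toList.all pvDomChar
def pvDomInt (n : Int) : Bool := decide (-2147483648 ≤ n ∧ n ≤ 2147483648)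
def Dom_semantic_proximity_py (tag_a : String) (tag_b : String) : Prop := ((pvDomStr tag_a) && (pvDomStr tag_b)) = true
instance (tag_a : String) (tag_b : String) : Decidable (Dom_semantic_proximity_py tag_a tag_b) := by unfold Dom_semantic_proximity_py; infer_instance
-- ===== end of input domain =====

-- ===== PORT A =====
-- B replaces the per-call scan over cluster set literals with a one-time inverted index (tag -> set of cluster ids) built from space-joined cluster strings; the query is two lookups + a set intersection.
def pvClusters : List (PySem.Set String) :=
  [PySem.Set.ofList ["power", "authority", "sovereignty", "domination", "mastery", "material_mastery", "strength", "intensity", "penetration", "fortitude", "inner_power", "taming_force", "qudra", "shani", "karmic_lord", "fixity"],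
   PySem.Set.ofList ["concealment", "mystery", "secrecy", "hidden", "batin", "withdrawal", "introspection", "sirr", "ketu", "moksha", "analysis"],
   PySem.Set.ofList ["expression", "communication", "creativity", "eloquence", "bayan", "radiance", "performance", "duality", "connection", "khalq", "creation", "fertility", "abundance", "creative_matrix", "creative_synthesis"],
   PySem.Set.ofList ["structure", "foundation", "discipline", "order", "stability", "ambition", "endurance", "rootedness", "accumulation", "arkan", "nizam"],
   PySem.Set.ofList ["freedom", "change", "adventure", "movement", "exploration", "liberation", "expansion", "vision", "philosophy", "innovation", "rebellion", "haraka"],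
   PySem.Set.ofList ["transformation", "crisis", "dissolution", "surrender", "transcendence"],
   PySem.Set.ofList ["nurturing", "service", "harmony", "compassion", "responsibility", "protection", "emotion", "sanctuary", "healing", "refinement", "ihsan", "beauty"],
   PySem.Set.ofList ["independence", "initiation", "pioneer", "self-reliance", "assertion", "impulse", "courage", "action", "tawhid", "alif"],
   PySem.Set.ofList ["spirituality", "wisdom", "inner_vision", "completion", "universality", "humanitarianism", "collective", "kamal", "tamam"],
   PySem.Set.ofList ["expansion", "growth", "abundance", "generosity", "prosperity", "brihaspati", "guru", "trimurti", "wood_growth"],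
   PySem.Set.ofList ["contraction", "limitation", "restriction", "endurance", "karma", "discipline", "patience"],
   PySem.Set.ofList ["intuition", "illumination", "inspiration", "channel", "sensitivity", "receptivity", "memory", "ilham", "kashf"],
   PySem.Set.ofList ["partnership", "diplomacy", "balance", "aesthetics", "justice", "pair_harmony", "dual_nature", "mizan"]]

def semantic_proximity_py (tag_a : String) (tag_b : String) : Bool :=
  -- for cluster in clusters: if tag_a in cluster and tag_b in cluster: return True / return False
  pvClusters.any (fun c => c.contains tag_a && c.contains tag_b)

-- ===== PORT B =====
-- _CLUSTER_WORDS: each cluster as one space-joined string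
def pvClusterWords : List String :=
  ["power authority sovereignty domination mastery material_mastery strength intensity penetration fortitude inner_power taming_force qudra shani karmic_lord fixity",
   "concealment mystery secrecy hidden batin withdrawal introspection sirr ketu moksha analysis",
   "expression communication creativity eloquence bayan radiance performance duality connection khalq creation fertility abundance creative_matrix creative_synthesis",
   "structure foundation discipline order stability ambition endurance rootedness accumulation arkan nizam",
   "freedom change adventure movement exploration liberation expansion vision philosophy innovation rebellion haraka",
   "transformation crisis dissolution surrender transcendence",
   "nurturing service harmony compassion responsibility protection emotion sanctuary healing refinement ihsan beauty",
   "independence initiation pioneer self-reliance assertion impulse courage action tawhid alif",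
   "spirituality wisdom inner_vision completion universality humanitarianism collective kamal tamam",
   "expansion growth abundance generosity prosperity brihaspati guru trimurti wood_growth",
   "contraction limitation restriction endurance karma discipline patience",
   "intuition illumination inspiration channel sensitivity receptivity memory ilham kashf",
   "partnership diplomacy balance aesthetics justice pair_harmony dual_nature mizan"]

-- for _i, _words in enumerate(_CLUSTER_WORDS): for _t in _words.split(): _INDEX.setdefault(_t, set()).add(_i)
def pvIndex : PySem.Dict String (PySem.Set Int) :=
  (PySem.List.enumerate pvClusterWords).foldl
    (fun d p => (PySem.Str.split₀ p.2).foldl (fun d t => d.modify t PySem.Set.empty (fun s => s.add p.1)) d)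
    PySem.Dict.empty

-- bool(_INDEX.get(tag_a, _EMPTY) & _INDEX.get(tag_b, _EMPTY))
def semantic_proximity_py_alt (tag_a : String) (tag_b : String) : Bool :=
  !(PySem.Set.inter (pvIndex.getD tag_a PySem.Set.empty) (pvIndex.getD tag_b PySem.Set.empty)).isEmpty

-- ===== PRECONDITION & SPEC =====
def Spec_semantic_proximity_py (tag_a : String) (tag_b : String) (out : Bool) : Prop := out = semantic_proximity_py_alt tag_a tag_b
instance (tag_a : String) (tag_b : String) (out : Bool) : Decidable (Spec_semantic_proximity_py tag_a tag_b out) := by unfold Spec_semantic_proximity_py; infer_instance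

-- ===== CLAIM =====
def Claim_equal_semantic_proximity_py : Prop := ∀ (tag_a : String) (tag_b : String), Dom_semantic_proximity_py tag_a tag_b → Spec_semantic_proximity_py tag_a tag_b (semantic_proximity_py tag_a tag_b)

-- ===== LEMMAS AND PROOFS =====

-- splitting the joined cluster strings recovers exactly the cluster word lists of port A
set_option maxRecDepth 8192 in
theorem pv_split : pvClusterWords.map PySem.Str.split₀ = pvClusters := by decide

-- pv_split read off at one position
theorem pv_split_get (n : Nat) (hW : n < pvClusterWords.length) (hA : n < pvClusters.length) :
    PySem.Str.split₀ pvClusterWords[n] = pvClusters[n] := by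
  have h := congrArg (fun l => l[n]?) pv_split
  simp only [List.getElem?_map, List.getElem?_eq_getElem hW, List.getElem?_eq_getElem hA,
    Option.map_some] at h
  exact Option.some.inj h

-- the inner loop (one cluster): the index entry of t gains i exactly when t is among the cluster's words
theorem pv_inner (c : List String) (i : Int) (d : PySem.Dict String (PySem.Set Int)) (t : String) :
    (c.foldl (fun d t' => d.modify t' PySem.Set.empty (fun s => s.add i)) d).getD t PySem.Set.empty
      = if t ∈ c then (d.getD t PySem.Set.empty).add i else d.getD t PySem.Set.empty := by
  induction c generalizing d with
  | nil => simp
  | cons h tl ih =>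
    simp only [List.foldl_cons]
    rw [ih]
    rw [PySem.Dict.getD_modify]
    by_cases ht : t = h
    · subst ht
      by_cases htl : t ∈ tl <;> simp [htl]
    · by_cases htl : t ∈ tl <;> simp [ht, htl, List.mem_cons]

-- the outer loop over the enumerated joined strings, membership characterised positionally
theorem pv_outer (l : List String) (k : Int) (d : PySem.Dict String (PySem.Set Int))
    (t : String) (j : Int) :
    (j ∈ ((PySem.List.enumerate l k).foldl
        (fun d p => (PySem.Str.split₀ p.2).foldl (fun d t' => d.modify t' PySem.Set.empty (fun s => s.add p.1)) d)
        d).getD t PySem.Set.empty)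
      ↔ j ∈ d.getD t PySem.Set.empty ∨ ∃ n : Nat, ∃ h : n < l.length, j = k + n ∧ t ∈ PySem.Str.split₀ l[n] := by
  induction l generalizing k d with
  | nil => simp [PySem.List.enumerate]
  | cons c tl ih =>
    simp only [PySem.List.enumerate, List.foldl_cons]
    rw [ih]
    rw [pv_inner]
    constructor
    · rintro (hj | ⟨n, hn, hjn, htn⟩)
      · by_cases htc : t ∈ PySem.Str.split₀ c
        · rw [if_pos htc] at hj
          rcases (PySem.Set.mem_add _ k j).1 hj with h | h
          · exact Or.inl h
          · refine Or.inr ⟨0, by simp, ?_, ?_⟩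
            · simpa using h
            · simpa using htc
        · rw [if_neg htc] at hj
          exact Or.inl hj
      · refine Or.inr ⟨n + 1, by simpa using hn, ?_, ?_⟩
        · push_cast; omega
        · simpa using htn
    · rintro (hj | ⟨n, hn, hjn, htn⟩)
      · by_cases htc : t ∈ PySem.Str.split₀ c
        · exact Or.inl (by rw [if_pos htc]; exact (PySem.Set.mem_add _ k j).2 (Or.inl hj))
        · exact Or.inl (by rw [if_neg htc]; exact hj)
      · cases n with
        | zero =>
          refine Or.inl ?_
          have htc : t ∈ PySem.Str.split₀ c := by simpa using htn
          rw [if_pos htc]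
          exact (PySem.Set.mem_add _ k j).2 (Or.inr (by simpa using hjn))
        | succ m =>
          refine Or.inr ⟨m, by simpa using hn, ?_, ?_⟩
          · push_cast at hjn ⊢; omega
          · simpa using htn

-- membership in an index entry, bridged to port A's cluster literals via pv_split
theorem pv_index_mem (t : String) (j : Int) :
    j ∈ pvIndex.getD t PySem.Set.empty
      ↔ ∃ n : Nat, ∃ h : n < pvClusters.length, j = (n : Int) ∧ t ∈ pvClusters[n] := by
  rw [pvIndex, pv_outer, PySem.Dict.getD_empty]
  have hlen : pvClusterWords.length = pvClusters.length := by decide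
  constructor
  · rintro (h | ⟨n, hn, hjn, htn⟩)
    · simp [PySem.Set.empty] at h
    · refine ⟨n, hlen ▸ hn, by simpa using hjn, ?_⟩
      exact (pv_split_get n hn (hlen ▸ hn)) ▸ htn
  · rintro ⟨n, hn, hjn, htn⟩
    refine Or.inr ⟨n, hlen ▸ hn, by simpa using hjn, ?_⟩
    exact (pv_split_get n (hlen ▸ hn) hn) ▸ htn

-- ===== VERDICT =====
theorem semantic_proximity_py_spec : Claim_equal_semantic_proximity_py := by
  intro a b _
  unfold Spec_semantic_proximity_py
  unfold semantic_proximity_py semantic_proximity_py_alt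
  rw [Bool.eq_iff_iff]
  simp only [List.any_eq_true, Bool.and_eq_true, PySem.Set.contains,
    Bool.not_eq_eq_eq_not, Bool.not_true, List.isEmpty_eq_false_iff_exists_mem,
    List.contains_iff_mem]
  constructor
  · rintro ⟨c, hc, ha, hb⟩
    obtain ⟨n, hn, hcn⟩ := List.mem_iff_getElem.1 hc
    refine ⟨(n : Int), (PySem.Set.mem_inter _ _ _).2 ⟨?_, ?_⟩⟩
    · exact (pv_index_mem a _).2 ⟨n, hn, rfl, hcn ▸ ha⟩
    · exact (pv_index_mem b _).2 ⟨n, hn, rfl, hcn ▸ hb⟩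
  · rintro ⟨j, hj⟩
    obtain ⟨hja, hjb⟩ := (PySem.Set.mem_inter _ _ _).1 hj
    obtain ⟨n, hn, hjn, han⟩ := (pv_index_mem a _).1 hja
    obtain ⟨m, hm, hjm, hbm⟩ := (pv_index_mem b _).1 hjb
    have : n = m := by omega
    subst this
    exact ⟨pvClusters[n], List.getElem_mem hn, han, hbm⟩
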